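-- pv_equiv track=rewrite | github.com/sebadiaz-arg/dpub | dpub/ref.py | prev_col
-- ===== SOURCE A (Python) =====
-- class RefError(Exception):
--     pass
--
-- def prev_col(col):
--     '''Decreases a column in one unit. If the column
--     has more than one letters, decreses the less weight one.
--     If that one is at A, it will come to Z an the next
--     weight will be decreased.
--
--     i.e.
--
--     B -> A
--     AB -> AA
--     BA -> AZ
--     AAA -> ZZ
--     '''
--     if col is None:
--         return 'A'
--
--     first_col = 'A'
--     if col is first_col:
--         raise RefError(
--             '{} column have not a previous column'.format(first_col))
--
--     res = []
--     carry = True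
--
--     for letter in reversed(col):
--         if carry:
--             if letter.upper() == 'A':
--                 prev_letter = 'Z'
--                 carry = True
--             else:
--                 prev_letter = chr(ord(letter) - 1)
--                 carry = False
--         else:
--             prev_letter = letter
--         res.insert(0, prev_letter)
--
--     # In case that carry is still true, we need to
--     # prepend a final 'A' letter because we have increased
--     # the end of the ZZZ...Z columns and a new letter is needed
--     if carry:
--         res.insert(0, 'Z')
--
--     return ''.join(res)
-- ===== SOURCE B (Python) =====
-- class RefError(Exception):
--     pass
--
-- def prev_col(col):
--     if col is None:
--         return 'A'
--     if col is 'A':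
--         raise RefError('A column have not a previous column')
--     # find the rightmost character that is not an 'A' (case-insensitive)
--     idx = None
--     for i in range(len(col) - 1, -1, -1):
--         if col[i].upper() != 'A':
--             idx = i
--             break
--     if idx is None:
--         # empty or all-A column: every letter wraps to Z and one more Z grows
--         return 'Z' * (len(col) + 1)
--     return col[:idx] + chr(ord(col[idx]) - 1) + 'Z' * (len(col) - idx - 1)
-- ===== Notes on version B (the rewrite author's own statement) =====
-- stated objective: alternative
-- what changed: Replaces the reversed carry loop that rebuilds the string letter by letter with a single scan for the rightmost non-'A' pivot followed by slice concatenation (prefix + decremented pivot + 'Z' padding).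
-- outside the precondition, e.g. on prev_col('A'): A raises RefError, B raises RefError
import Mathlib
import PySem

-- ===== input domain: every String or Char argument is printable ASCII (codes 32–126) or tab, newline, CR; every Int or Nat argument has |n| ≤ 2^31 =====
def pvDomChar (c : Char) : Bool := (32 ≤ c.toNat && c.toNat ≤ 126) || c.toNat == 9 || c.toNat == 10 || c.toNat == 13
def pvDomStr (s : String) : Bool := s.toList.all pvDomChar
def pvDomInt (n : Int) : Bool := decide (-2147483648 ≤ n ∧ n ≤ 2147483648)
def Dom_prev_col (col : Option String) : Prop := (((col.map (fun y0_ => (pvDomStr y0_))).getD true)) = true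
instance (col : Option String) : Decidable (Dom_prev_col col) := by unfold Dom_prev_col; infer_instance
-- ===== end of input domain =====

-- B replaces A's reversed carry loop by one scan for the
-- rightmost non-'A' pivot plus slice concatenation; return values proved equal outside col = "A".

-- ===== PORT A =====
-- one step of A's 'for letter in reversed(col)' loop; state = (res, carry), res.insert(0, x) = x :: res
def prevColStep (st : List Char × Bool) (letter : Char) : List Char × Bool :=
  if st.2 then
    if PySem.Chars.upperChar letter = 'A' then ('Z' :: st.1, true)
    else (Char.ofNat (letter.toNat - 1) :: st.1, false)
  else (letter :: st.1, st.2)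

def prev_col (col : Option String) : String :=
  match col with
  | none => "A"
  | some c =>
    -- 'col is first_col' raises RefError for the interned literal "A"; excluded by Pre_prev_col
    if c = "A" then "" else
      let st := (c.toList.reverse).foldl prevColStep ([], true)
      let res := if st.2 then 'Z' :: st.1 else st.1
      String.mk res

-- ===== PORT B =====
-- Source B's 'for i in range(len(col)-1, -1, -1): if col[i].upper() != 'A': idx = i; break':
-- index of the rightmost character whose upper() ≠ 'A' (none if there is no such character)
def pivotIdx : List Char → Option Nat
  | [] => none
  | x :: xs =>
    match pivotIdx xs with
    | some j => some (j + 1)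
    | none => if PySem.Chars.upperChar x ≠ 'A' then some 0 else none

def prev_col_alt (col : Option String) : String :=
  match col with
  | none => "A"
  | some c =>
    if c = "A" then "" else
      let l := c.toList
      match pivotIdx l with
      | none => String.mk (List.replicate (l.length + 1) 'Z')
      | some i =>
          String.mk (l.take i ++ Char.ofNat ((l.getD i 'A').toNat - 1)
                       :: List.replicate (l.length - i - 1) 'Z')

-- ===== PRECONDITION & SPEC =====
-- Pre_ excludes only col = some "A", where the Python raises RefError ('A' is interned, so 'col is first_col' holds).
def Pre_prev_col (col : Option String) : Prop := col ≠ some "A"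
instance (col : Option String) : Decidable (Pre_prev_col col) := by unfold Pre_prev_col; infer_instance
def pvWitness_prev_col : Option String := some "B"

def Spec_prev_col (col : Option String) (out : String) : Prop := out = prev_col_alt col
instance (col : Option String) (out : String) : Decidable (Spec_prev_col col out) := by unfold Spec_prev_col; infer_instance

-- ===== CLAIM (what is proved, stated in full; the proofs are below) =====
def Claim_equal_prev_col : Prop := ∀ (col : Option String), Dom_prev_col col → Pre_prev_col col → Spec_prev_col col (prev_col col)

-- ===== LEMMAS AND PROOFS =====

-- A's loop in right-to-left recursive form
def aLoop : List Char → List Char × Bool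
  | [] => ([], true)
  | x :: xs => prevColStep (aLoop xs) x

theorem foldl_rev_eq_aLoop (l : List Char) :
    (l.reverse).foldl prevColStep ([], true) = aLoop l := by
  induction l with
  | nil => rfl
  | cons x xs ih => simp [List.reverse_cons, List.foldl_append, ih, aLoop]

-- characterisation of A's loop by B's pivot index
theorem aLoop_char (l : List Char) :
    (pivotIdx l = none → aLoop l = (List.replicate l.length 'Z', true)) ∧
    (∀ i, pivotIdx l = some i →
      aLoop l = (l.take i ++ Char.ofNat ((l.getD i 'A').toNat - 1)
                   :: List.replicate (l.length - i - 1) 'Z', false)) := by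
  induction l with
  | nil => exact ⟨fun _ => rfl, fun i h => by simp [pivotIdx] at h⟩
  | cons x xs ih =>
    obtain ⟨hnone, hsome⟩ := ih
    constructor
    · intro h
      simp only [pivotIdx] at h
      cases hx : pivotIdx xs with
      | some j => simp [hx] at h
      | none =>
        simp only [hx] at h
        split at h
        · exact absurd h (by simp)
        · rename_i hA
          push_neg at hA
          simp only [aLoop, hnone hx, prevColStep, hA, if_pos rfl, if_pos]
          simp [List.replicate]
    · intro i h
      simp only [pivotIdx] at h
      cases hx : pivotIdx xs with
      | some j =>
        simp only [hx] at h
        injection h with h; subst h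
        simp only [aLoop, hsome j hx, prevColStep, if_neg Bool.false_ne_true]
        simp [List.take_succ_cons, List.getD_cons_succ, Nat.succ_sub_one]
      | none =>
        simp only [hx] at h
        split at h
        · rename_i hA
          injection h with h; subst h
          simp only [aLoop, hnone hx, prevColStep, if_pos rfl, if_neg hA]
          simp
        · exact absurd h (by simp)

-- ===== VERDICT (by name: the statement is the Claim_ definition above) =====
theorem prev_col_spec : Claim_equal_prev_col := by
  intro col _ hpre
  unfold Spec_prev_col
  match col with
  | none => rfl
  | some c =>
    have hc : c ≠ "A" := fun h => hpre (by rw [h])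
    simp only [prev_col, prev_col_alt, if_neg hc]
    obtain ⟨hnone, hsome⟩ := aLoop_char c.toList
    cases hp : pivotIdx c.toList with
    | none =>
      simp only [foldl_rev_eq_aLoop, hnone hp]
      simp [List.replicate]
    | some i =>
      simp only [foldl_rev_eq_aLoop, hsome i hp]
      simp
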